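-- pv_equiv track=rewrite | github.com/ginoecb/python_book_project | BookProject.py | get_page_cuts
-- ===== SOURCE A (Python) =====
-- def get_page_cuts(arr, tolerance):
--     ''' Determine cut distance(s) for a given page '''
--     start = -1
--     stop = -1
--     cuts_list = []
--     cut = []
--     i = 0
--     for elt in arr:
--         if elt >= tolerance and start == -1:
--             start = i
--             cut.append(start)
--             stop = -1
--         elif elt < tolerance and start != -1 and stop == -1:
--             stop = i
--             cut.append(stop)
--             cuts_list.append(cut)
--             cut = []
--             start = -1
--         i += 1
--     # If the entire page
--
--     return cuts_list
-- ===== SOURCE B (Python) =====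
-- def get_page_cuts(arr, tolerance):
--     ''' Determine cut distance(s) for a given page '''
--     arr = list(arr)
--     n = len(arr)
--     # Run-length decomposition: maximal runs of elements on one side of tolerance,
--     # stored as (is_high, start, stop). A cut is a high run with a run after it.
--     runs = []
--     i = 0
--     while i < n:
--         k = arr[i] >= tolerance
--         j = i + 1
--         while j < n and (arr[j] >= tolerance) == k:
--             j += 1
--         runs.append((k, i, j))
--         i = j
--     return [[s, e] for k, s, e in runs[:-1] if k]
-- ===== Notes on version B (the rewrite author's own statement) =====
-- stated objective: alternative
-- what changed: Replaces A's element-wise sentinel state machine by a run-length decomposition: the array is first partitioned into maximal runs on one side of the tolerance (is_high, start, stop), then the cuts are read off as the high runs that are not the last run.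
import Mathlib
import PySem

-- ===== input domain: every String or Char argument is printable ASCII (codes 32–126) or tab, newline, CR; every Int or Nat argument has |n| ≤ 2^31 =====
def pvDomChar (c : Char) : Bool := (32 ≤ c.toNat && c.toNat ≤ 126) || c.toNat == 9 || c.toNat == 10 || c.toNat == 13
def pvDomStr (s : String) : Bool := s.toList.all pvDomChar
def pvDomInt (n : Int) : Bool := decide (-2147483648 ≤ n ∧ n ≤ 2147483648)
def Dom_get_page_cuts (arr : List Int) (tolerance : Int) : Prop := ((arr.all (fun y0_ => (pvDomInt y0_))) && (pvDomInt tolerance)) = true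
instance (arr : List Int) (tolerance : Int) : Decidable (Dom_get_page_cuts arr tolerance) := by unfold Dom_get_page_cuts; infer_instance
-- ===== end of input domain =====

-- B replaces A's element-wise sentinel state machine by a run-length decomposition (maximal runs on one side of tolerance, then read off high runs that are not last): alternative decomposition, same cost.


-- ===== PORT A =====
-- state: start, stop, cuts_list, cut, i; one step per element, branches in A's order
def pcLoopA (tol : Int) : List Int → Int → Int → List (List Int) → List Int → Int → List (List Int)
  | [], _, _, cuts, _, _ => cuts
  | elt :: rest, start, stop, cuts, cut, i =>
    if elt ≥ tol ∧ start = -1 then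
      pcLoopA tol rest i (-1) cuts (cut ++ [i]) (i + 1)
    else if elt < tol ∧ start ≠ -1 ∧ stop = -1 then
      pcLoopA tol rest (-1) i (cuts ++ [cut ++ [i]]) [] (i + 1)
    else
      pcLoopA tol rest start stop cuts cut (i + 1)

def get_page_cuts (arr : List Int) (tolerance : Int) : List (List Int) :=
  pcLoopA tolerance arr (-1) (-1) [] [] 0

-- ===== PORT B =====
-- inner while loop of Source B: consume elements while (elt >= tol) == k, returning (stop index j, remaining list)
def pcTake (tol : Int) (k : Bool) : List Int → Int → Int × List Int
  | [], j => (j, [])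
  | x :: xs, j => if (decide (x ≥ tol)) == k then pcTake tol k xs (j + 1) else (j, x :: xs)

-- termination measure for the outer loop (cited by pcRuns's decreasing_by)
lemma pcTake_len (tol : Int) (k : Bool) : ∀ (ys : List Int) (j : Int), (pcTake tol k ys j).2.length ≤ ys.length := by
  intro ys
  induction ys with
  | nil => intro j; simp [pcTake]
  | cons x xs ih =>
      intro j
      by_cases h : (decide (x ≥ tol)) == k
      · simp only [pcTake, h, if_pos]
        exact le_trans (ih (j + 1)) (Nat.le_succ _)
      · simp [pcTake, h]

-- outer while loop of Source B: the list of maximal runs (is_high, start, stop)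
def pcRuns (tol : Int) : List Int → Int → List (Bool × Int × Int)
  | [], _ => []
  | x :: xs, i =>
    let k := decide (x ≥ tol)
    (k, i, (pcTake tol k xs (i + 1)).1) ::
      pcRuns tol (pcTake tol k xs (i + 1)).2 (pcTake tol k xs (i + 1)).1
termination_by ys _ => ys.length
decreasing_by exact Nat.lt_succ_of_le (pcTake_len tol _ xs (i + 1))

-- Source B's final comprehension: [[s, e] for k, s, e in runs[:-1] if k]
def pcEmit (runs : List (Bool × Int × Int)) : List (List Int) :=
  (runs.dropLast.filter (fun r => r.1)).map (fun r => [r.2.1, r.2.2])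

def get_page_cuts_alt (arr : List Int) (tolerance : Int) : List (List Int) :=
  pcEmit (pcRuns tolerance arr 0)

-- ===== PRECONDITION & SPEC =====
def Spec_get_page_cuts (arr : List Int) (tolerance : Int) (out : List (List Int)) : Prop := out = get_page_cuts_alt arr tolerance
instance (arr : List Int) (tolerance : Int) (out : List (List Int)) : Decidable (Spec_get_page_cuts arr tolerance out) := by unfold Spec_get_page_cuts; infer_instance

-- ===== CLAIM (what is proved, stated in full; the proofs are below) =====
def Claim_equal_get_page_cuts : Prop := ∀ (arr : List Int) (tolerance : Int), Dom_get_page_cuts arr tolerance → Spec_get_page_cuts arr tolerance (get_page_cuts arr tolerance)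

-- ===== LEMMAS AND PROOFS =====

lemma pcTake_fst_ge (tol : Int) (k : Bool) : ∀ (ys : List Int) (j : Int), j ≤ (pcTake tol k ys j).1 := by
  intro ys
  induction ys with
  | nil => intro j; simp [pcTake]
  | cons x xs ih =>
      intro j
      by_cases h : (decide (x ≥ tol)) == k
      · simp only [pcTake, h, if_pos]
        exact le_trans (by omega) (ih (j + 1))
      · simp [pcTake, h]

lemma pcTake_true_head_lt (tol : Int) : ∀ (ys : List Int) (j : Int) (l : Int) (r : List Int),
    (pcTake tol true ys j).2 = l :: r → l < tol := by
  intro ys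
  induction ys with
  | nil => intro j l r h; simp [pcTake] at h
  | cons x xs ih =>
      intro j l r h
      by_cases hx : (decide (x ≥ tol)) == true
      · simp only [pcTake, hx, if_pos] at h
        exact ih (j + 1) l r h
      · rw [pcTake, if_neg hx] at h
        simp only at h
        injection h with h1 h2
        have hx' : ¬ (x ≥ tol) := by simpa using hx
        omega

-- A stays in the high state (start = s ≠ -1, stop = -1, cut = [s]) across a maximal high run
lemma pc_skipHigh (tol : Int) : ∀ (ys : List Int) (i s : Int) (cuts : List (List Int)), s ≠ -1 →
    pcLoopA tol ys s (-1) cuts [s] i =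
      pcLoopA tol (pcTake tol true ys i).2 s (-1) cuts [s] (pcTake tol true ys i).1 := by
  intro ys
  induction ys with
  | nil => intro i s cuts hs; simp [pcTake]
  | cons x xs ih =>
      intro i s cuts hs
      by_cases hx : x ≥ tol
      · have hb : (decide (x ≥ tol)) == true := by simp [hx]
        have hA : pcLoopA tol (x :: xs) s (-1) cuts [s] i = pcLoopA tol xs s (-1) cuts [s] (i + 1) := by
          simp [pcLoopA, hx, hs, not_lt.mpr hx]
        rw [hA]
        simp only [pcTake, hb, if_pos]
        exact ih (i + 1) s cuts hs
      · have hb : ¬ ((decide (x ≥ tol)) == true) := by simp [hx]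
        simp [pcTake, hb]

-- a low run at the head contributes nothing to the emitted cuts
lemma pcEmit_false_cons (a b : Int) (rs : List (Bool × Int × Int)) :
    pcEmit ((false, a, b) :: rs) = pcEmit rs := by
  cases rs with
  | nil => simp [pcEmit]
  | cons r rs' => simp [pcEmit]

lemma pcEmit_true_cons (s e : Int) (rs : List (Bool × Int × Int)) (h : rs ≠ []) :
    pcEmit ((true, s, e) :: rs) = [s, e] :: pcEmit rs := by
  cases rs with
  | nil => exact absurd rfl h
  | cons r rs' => simp [pcEmit]

lemma pcRuns_cons_ne_nil (tol y : Int) (ys : List Int) (i : Int) :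
    pcRuns tol (y :: ys) i ≠ [] := by
  rw [pcRuns]; simp

-- a leading low element changes the run boundaries but not the emitted cuts
lemma pcEmit_runs_low (tol : Int) (l : Int) (hl : l < tol) (rest : List Int) (j : Int) :
    pcEmit (pcRuns tol (l :: rest) j) = pcEmit (pcRuns tol rest (j + 1)) := by
  have hk : decide (l ≥ tol) = false := by simp; omega
  rw [pcRuns]
  simp only [hk]
  rw [pcEmit_false_cons]
  cases rest with
  | nil => simp [pcTake, pcRuns]
  | cons y ys =>
      by_cases hy : y ≥ tol
      · have hk2 : decide (y ≥ tol) = true := by simp [hy]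
        simp [pcTake, hk2]
      · have hk2 : decide (y ≥ tol) = false := by simp [hy]
        simp only [pcTake, hk2]
        conv_rhs => rw [pcRuns]
        simp only [hk2]
        rw [pcEmit_false_cons]
        simp

-- main invariant: from the low state A's loop appends exactly the cuts read off the run decomposition
lemma pc_main (tol : Int) : ∀ (n : Nat) (ys : List Int), ys.length ≤ n →
    ∀ (i stop : Int) (cuts : List (List Int)), 0 ≤ i →
      pcLoopA tol ys (-1) stop cuts [] i = cuts ++ pcEmit (pcRuns tol ys i) := by
  intro n
  induction n with
  | zero =>
      intro ys hlen i stop cuts hi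
      have : ys = [] := List.length_eq_zero_iff.mp (Nat.le_zero.mp hlen)
      subst this
      simp [pcLoopA, pcRuns, pcEmit]
  | succ m ih =>
      intro ys hlen i stop cuts hi
      cases ys with
      | nil => simp [pcLoopA, pcRuns, pcEmit]
      | cons x xs =>
          by_cases hx : x ≥ tol
          · -- rise: enter high state at i
            have hA : pcLoopA tol (x :: xs) (-1) stop cuts [] i =
                pcLoopA tol xs i (-1) cuts [i] (i + 1) := by
              simp [pcLoopA, hx]
            have hine : i ≠ -1 := by omega
            rw [hA, pc_skipHigh tol xs (i + 1) i cuts hine]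
            have hk : decide (x ≥ tol) = true := by simp [hx]
            rw [pcRuns]
            simp only [hk]
            rcases hrest : (pcTake tol true xs (i + 1)).2 with _ | ⟨l, rest'⟩
            · -- unfinished trailing high run: dropped on both sides
              simp [pcLoopA, pcRuns, pcEmit]
            · have hl : l < tol := pcTake_true_head_lt tol xs (i + 1) l rest' hrest
              set j := (pcTake tol true xs (i + 1)).1 with hj
              have hjge : (0:Int) ≤ j := le_trans (by omega) (pcTake_fst_ge tol true xs (i + 1))
              have hA2 : pcLoopA tol (l :: rest') i (-1) cuts [i] j =
                  pcLoopA tol rest' (-1) j (cuts ++ [[i, j]]) [] (j + 1) := by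
                simp [pcLoopA, hl, hine, not_le.mpr hl]
              rw [hA2]
              have hlen' : rest'.length ≤ m := by
                have h1 : (pcTake tol true xs (i + 1)).2.length ≤ xs.length :=
                  pcTake_len tol true xs (i + 1)
                rw [hrest] at h1
                simp at h1 hlen
                omega
              rw [ih rest' hlen' (j + 1) j (cuts ++ [[i, j]]) (by omega)]
              rw [pcEmit_true_cons i j (pcRuns tol (l :: rest') j) (pcRuns_cons_ne_nil tol l rest' j)]
              rw [pcEmit_runs_low tol l hl rest' j]
              simp
          · -- low element: skip on both sides
            have hA : pcLoopA tol (x :: xs) (-1) stop cuts [] i =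
                pcLoopA tol xs (-1) stop cuts [] (i + 1) := by
              simp [pcLoopA, hx]
            rw [hA, ih xs (by simpa using Nat.lt_succ_iff.mp (Nat.lt_of_lt_of_le (by simp) hlen)) (i + 1) stop cuts (by omega)]
            rw [pcEmit_runs_low tol x (by omega) xs i]

-- ===== VERDICT (by name: the statement is the Claim_ definition above) =====
theorem get_page_cuts_spec : Claim_equal_get_page_cuts := by
  intro arr tol _
  unfold Spec_get_page_cuts get_page_cuts get_page_cuts_alt
  simpa using pc_main tol arr.length arr (le_refl _) 0 (-1) [] (by omega)
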